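-- pv_equiv track=rewrite | github.com/KarimElbarbary99/Symbolic-AI-and-Logic-Based-Systems-project- | Solve Nonograms/Approach2_rect.py | find_first_positive
-- ===== SOURCE A (Python) =====
-- def find_first_positive(clues, solution):
--     first_positives = []
--     for clue in clues:
--         # Since clues can have multiple elements, iterate through the elements of each clue
--         clue_positives = []
--         for _ in clue:  # For each element in the clue, find a positive number
--             first_positive = next((var for var in solution if var > 0), None)
--             if first_positive:
--                 clue_positives.append(first_positive)
--                 # Remove the found positive number from the solution list to not find it again
--                 solution.remove(first_positive)
--         first_positives.append(clue_positives)
--     return first_positives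
-- ===== SOURCE B (Python) =====
-- def find_first_positive(clues, solution):
--     # One pass: collect the positives in order, then hand them out to clue slots.
--     positives = [v for v in solution if v > 0]
--     out = []
--     i = 0
--     for clue in clues:
--         chunk = positives[i:i + len(clue)]
--         out.append(chunk)
--         i += len(chunk)
--     # replicate A's in-place consumption: drop the first i positive elements
--     remaining = i
--     kept = []
--     for v in solution:
--         if v > 0 and remaining > 0:
--             remaining -= 1
--         else:
--             kept.append(v)
--     solution[:] = kept
--     return out
-- ===== Notes on version B (the rewrite author's own statement) =====
-- stated objective: faster
-- what changed: B filters the positives of solution once in order and slices them out sequentially per clue, instead of A's per-clue-element rescan of solution followed by list.remove; B replicates A's in-place consumption of solution at the end.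
import Mathlib
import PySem

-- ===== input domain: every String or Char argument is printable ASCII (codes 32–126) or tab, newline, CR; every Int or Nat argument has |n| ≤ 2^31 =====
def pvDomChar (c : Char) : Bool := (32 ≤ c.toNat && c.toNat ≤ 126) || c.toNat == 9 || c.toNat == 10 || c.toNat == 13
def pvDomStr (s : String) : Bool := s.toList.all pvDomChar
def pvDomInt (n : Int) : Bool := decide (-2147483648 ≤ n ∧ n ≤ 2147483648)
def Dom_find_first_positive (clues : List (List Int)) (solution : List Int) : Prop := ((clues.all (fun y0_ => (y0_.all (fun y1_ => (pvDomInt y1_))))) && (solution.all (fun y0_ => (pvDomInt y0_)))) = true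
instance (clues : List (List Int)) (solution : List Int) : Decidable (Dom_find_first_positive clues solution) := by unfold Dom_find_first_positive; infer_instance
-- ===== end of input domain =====

-- B collects the positives of `solution` in one pass and slices them out per clue (O(n+E))
-- instead of A's repeated scan-and-remove (O(E·n)). A mutates `solution` in place; the Python B
-- replicates that mutation, and the theorems here are about the RETURN value.

-- ===== PORT A =====
-- next((var for var in solution if var > 0), None)
def ffpNext : List Int → Option Int
  | [] => none
  | v :: rest => if 0 < v then some v else ffpNext rest

-- solution.remove(p): drop the first occurrence (identity if absent; A only calls it on present p)
def ffpRemove : List Int → Int → List Int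
  | [], _ => []
  | x :: xs, p => if x = p then xs else x :: ffpRemove xs p

-- inner 'for _ in clue' loop; state = (clue_positives, solution).
-- 'if first_positive:' is truthy exactly when next found some p (p > 0 is never falsy 0).
def ffpInner : List Int → List Int → List Int → List Int × List Int
  | [], cps, sol => (cps, sol)
  | _ :: rest, cps, sol =>
    match ffpNext sol with
    | some p => ffpInner rest (cps ++ [p]) (ffpRemove sol p)
    | none => ffpInner rest cps sol

-- outer 'for clue in clues' loop; state = (first_positives, solution)
def ffpOuter : List (List Int) → List (List Int) → List Int → List (List Int) × List Int
  | [], fps, sol => (fps, sol)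
  | clue :: rest, fps, sol =>
    let r := ffpInner clue [] sol
    ffpOuter rest (fps ++ [r.1]) r.2

def find_first_positive (clues : List (List Int)) (solution : List Int) : List (List Int) :=
  (ffpOuter clues [] solution).1

-- ===== PORT B =====
-- for clue in clues: chunk = positives[i:i+len(clue)]; out.append(chunk); i += len(chunk)
def ffpAltGo : List (List Int) → List Int → Int → List (List Int) → List (List Int)
  | [], _, _, out => out
  | clue :: rest, positives, i, out =>
    let chunk := PySem.List.slice positives (some i) (some (i + (clue.length : Int)))
    ffpAltGo rest positives (i + (chunk.length : Int)) (out ++ [chunk])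

def find_first_positive_alt (clues : List (List Int)) (solution : List Int) : List (List Int) :=
  ffpAltGo clues (solution.filter (fun v => decide (0 < v))) 0 []

-- ===== PRECONDITION & SPEC =====
def Spec_find_first_positive (clues : List (List Int)) (solution : List Int) (out : List (List Int)) : Prop := out = find_first_positive_alt clues solution
instance (clues : List (List Int)) (solution : List Int) (out : List (List Int)) : Decidable (Spec_find_first_positive clues solution out) := by unfold Spec_find_first_positive; infer_instance

-- ===== CLAIM (what is proved, stated in full; the proofs are below) =====
def Claim_equal_find_first_positive : Prop := ∀ (clues : List (List Int)) (solution : List Int), Dom_find_first_positive clues solution → Spec_find_first_positive clues solution (find_first_positive clues solution)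

-- ===== LEMMAS AND PROOFS =====

-- the common denominator: chunk a list of positives by clue lengths
def ffpChunks : List (List Int) → List Int → List (List Int)
  | [], _ => []
  | clue :: rest, ps => ps.take clue.length :: ffpChunks rest (ps.drop clue.length)

theorem ffpNext_pos : ∀ (sol : List Int) (p : Int), ffpNext sol = some p → 0 < p := by
  intro sol
  induction sol with
  | nil => intro p h; simp [ffpNext] at h
  | cons x xs ih =>
    intro p h
    by_cases hx : 0 < x
    · simp [ffpNext, hx] at h; omega
    · simp [ffpNext, hx] at h; exact ih p h

theorem ffpNext_none : ∀ (sol : List Int), ffpNext sol = none →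
    sol.filter (fun v => decide (0 < v)) = [] := by
  intro sol
  induction sol with
  | nil => intro _; simp
  | cons x xs ih =>
    intro h
    by_cases hx : 0 < x
    · simp [ffpNext, hx] at h
    · simp [ffpNext, hx] at h ⊢; simpa using ih h

theorem ffpNext_some : ∀ (sol : List Int) (p : Int), ffpNext sol = some p →
    sol.filter (fun v => decide (0 < v)) = p :: (ffpRemove sol p).filter (fun v => decide (0 < v)) := by
  intro sol
  induction sol with
  | nil => intro p h; simp [ffpNext] at h
  | cons x xs ih =>
    intro p h
    by_cases hx : 0 < x
    · simp [ffpNext, hx] at h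
      subst h
      simp [ffpRemove, hx]
    · simp [ffpNext, hx] at h
      have hp : 0 < p := ffpNext_pos xs p h
      have hxp : x ≠ p := by omega
      simp [ffpRemove, hxp, hx]
      exact ih p h

theorem ffpInner_spec : ∀ (clue cps sol : List Int),
    (ffpInner clue cps sol).1 = cps ++ (sol.filter (fun v => decide (0 < v))).take clue.length ∧
    (ffpInner clue cps sol).2.filter (fun v => decide (0 < v)) =
      (sol.filter (fun v => decide (0 < v))).drop clue.length := by
  intro clue
  induction clue with
  | nil => intro cps sol; simp [ffpInner]
  | cons c rest ih =>
    intro cps sol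
    cases h : ffpNext sol with
    | none =>
      have hnil := ffpNext_none sol h
      have := ih cps sol
      simp [ffpInner, h, hnil] at this ⊢
      exact this
    | some p =>
      have hf := ffpNext_some sol p h
      have := ih (cps ++ [p]) (ffpRemove sol p)
      simp [ffpInner, h, hf] at this ⊢
      exact this

theorem ffpOuter_spec : ∀ (clues : List (List Int)) (fps : List (List Int)) (sol : List Int),
    (ffpOuter clues fps sol).1 = fps ++ ffpChunks clues (sol.filter (fun v => decide (0 < v))) := by
  intro clues
  induction clues with
  | nil => intro fps sol; simp [ffpOuter, ffpChunks]
  | cons clue rest ih =>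
    intro fps sol
    obtain ⟨h1, h2⟩ := ffpInner_spec clue [] sol
    simp [ffpOuter, ffpChunks, ih, h1, h2]

theorem ffp_drop_min {α : Type} (l : List α) (k : Nat) : l.drop (min k l.length) = l.drop k := by
  rcases le_total k l.length with h | h
  · rw [min_eq_left h]
  · rw [min_eq_right h, List.drop_length, List.drop_eq_nil_of_le h]

theorem ffpAltGo_spec : ∀ (clues : List (List Int)) (ps : List Int) (j : Nat) (out : List (List Int)),
    ffpAltGo clues ps (j : Int) out = out ++ ffpChunks clues (ps.drop j) := by
  intro clues
  induction clues with
  | nil => intro ps j out; simp [ffpAltGo, ffpChunks]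
  | cons clue rest ih =>
    intro ps j out
    have hslice : PySem.List.slice ps (some (j : Int)) (some ((j : Int) + (clue.length : Int))) =
        (ps.drop j).take clue.length := PySem.List.slice_natCast_add ps j clue.length
    have hlen : ((ps.drop j).take clue.length).length = min clue.length (ps.drop j).length := by
      simp
    have hcast : ((j : Int) + ((((ps.drop j).take clue.length)).length : Int)) =
        ((j + ((ps.drop j).take clue.length).length : Nat) : Int) := by push_cast; ring
    calc ffpAltGo (clue :: rest) ps (j : Int) out
        = ffpAltGo rest ps ((j + ((ps.drop j).take clue.length).length : Nat) : Int)
            (out ++ [(ps.drop j).take clue.length]) := by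
          simp only [ffpAltGo, hslice, hcast]
      _ = out ++ ffpChunks (clue :: rest) (ps.drop j) := by
          have hdrop : ps.drop (j + ((ps.drop j).take clue.length).length) =
              (ps.drop j).drop clue.length := by
            rw [hlen, ← List.drop_drop, ffp_drop_min]
          rw [ih, hdrop]
          simp [ffpChunks]

-- ===== VERDICT (by name: the statement is the Claim_ definition above) =====
theorem find_first_positive_spec : Claim_equal_find_first_positive := by
  intro clues solution _
  unfold Spec_find_first_positive find_first_positive find_first_positive_alt
  rw [ffpOuter_spec]
  have := ffpAltGo_spec clues (solution.filter (fun v => decide (0 < v))) 0 []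
  simp at this ⊢
  rw [this]
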